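-- pv_equiv track=rewrite | github.com/permCoding/ege-23-24 | days/2024-03-09 tasks 14-23/13096.py | to_int_1
-- ===== SOURCE A (Python) =====
-- def to_int_1(t):
--     base = 39
--     p = 0
--     res = 0
--     for elm in t[::-1]:
--         res += elm * base ** p
--         p += 1
--     return res  # из 39-ричной
-- ===== SOURCE B (Python) =====
-- def to_int_1(t):
--     res = 0
--     for elm in t:
--         res = res * 39 + elm
--     return res
-- ===== Notes on version B (the rewrite author's own statement) =====
-- stated objective: faster
-- what changed: Replaces the reversed-traversal sum of elm*39**p (recomputing a growing power each step) by a single left-to-right Horner fold res = res*39 + elm.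
import Mathlib
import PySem

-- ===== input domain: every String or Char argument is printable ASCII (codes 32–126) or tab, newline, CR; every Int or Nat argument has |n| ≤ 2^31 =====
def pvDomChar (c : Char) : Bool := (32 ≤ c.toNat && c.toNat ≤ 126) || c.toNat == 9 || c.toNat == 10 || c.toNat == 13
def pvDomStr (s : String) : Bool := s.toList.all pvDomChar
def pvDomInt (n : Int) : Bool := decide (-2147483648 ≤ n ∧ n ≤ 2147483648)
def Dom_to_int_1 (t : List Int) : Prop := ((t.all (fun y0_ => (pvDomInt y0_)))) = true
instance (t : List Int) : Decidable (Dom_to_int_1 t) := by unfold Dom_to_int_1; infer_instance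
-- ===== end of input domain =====

-- B replaces A's reversed traversal summing elm*39**p with a left-to-right Horner fold (objective: faster).

-- ===== PORT A =====
-- A: iterate over t[::-1] keeping a power counter p and res += elm * 39 ** p
def to_int_1 (t : List Int) : Int :=
  match PySem.List.slice? t none none (-1) with
  | some r => (r.foldl
      (fun (st : Nat × Int) elm => (st.1 + 1, st.2 + elm * (39 : Int) ^ st.1)) (0, 0)).2
  | none => 0  -- unreachable: step = -1 ≠ 0

-- ===== PORT B =====
def to_int_1_alt (t : List Int) : Int :=
  t.foldl (fun res elm => res * 39 + elm) 0

-- ===== PRECONDITION & SPEC =====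
def Spec_to_int_1 (t : List Int) (out : Int) : Prop := out = to_int_1_alt t
instance (t : List Int) (out : Int) : Decidable (Spec_to_int_1 t out) := by unfold Spec_to_int_1; infer_instance

-- ===== CLAIM (what is proved, stated in full; the proofs are below) =====
def Claim_equal_to_int_1 : Prop := ∀ (t : List Int), Dom_to_int_1 t → Spec_to_int_1 t (to_int_1 t)

-- ===== LEMMAS AND PROOFS =====

theorem pv_horner_acc (s : List Int) (acc : Int) :
    s.foldl (fun res elm => res * 39 + elm) acc
      = acc * (39 : Int) ^ s.length + s.foldl (fun res elm => res * 39 + elm) 0 := by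
  induction s generalizing acc with
  | nil => simp
  | cons a s ih =>
    simp only [List.foldl_cons, List.length_cons]
    rw [ih (acc * 39 + a), ih (0 * 39 + a)]
    ring

theorem pv_key (t : List Int) (p : Nat) (res : Int) :
    (t.reverse.foldl
      (fun (st : Nat × Int) elm => (st.1 + 1, st.2 + elm * (39 : Int) ^ st.1)) (p, res)).2
      = res + (39 : Int) ^ p * t.foldl (fun res elm => res * 39 + elm) 0 := by
  induction t generalizing p res with
  | nil => simp
  | cons a s ih =>
    have hfst : ∀ (l : List Int) (q : Nat) (r : Int),
        (l.foldl (fun (st : Nat × Int) elm => (st.1 + 1, st.2 + elm * (39 : Int) ^ st.1)) (q, r)).1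
          = q + l.length := by
      intro l
      induction l with
      | nil => intro q r; simp
      | cons b l ihl => intro q r; simp [List.foldl_cons, ihl]; omega
    simp only [List.reverse_cons, List.foldl_append, List.foldl_cons, List.foldl_nil]
    have h1 := ih p res
    have h2 := hfst s.reverse p res
    set st := s.reverse.foldl
      (fun (st : Nat × Int) elm => (st.1 + 1, st.2 + elm * (39 : Int) ^ st.1)) (p, res) with hst
    rw [h1, h2]
    simp only [List.length_reverse]
    rw [pv_horner_acc s (0 * 39 + a), pow_add]
    ring

-- ===== VERDICT (by name: the statement is the Claim_ definition above) =====
theorem to_int_1_spec : Claim_equal_to_int_1 := by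
  intro t _
  show to_int_1 t = to_int_1_alt t
  unfold to_int_1 to_int_1_alt
  rw [PySem.List.slice?_none_none_neg_one]
  show (t.reverse.foldl
      (fun (st : Nat × Int) elm => (st.1 + 1, st.2 + elm * (39 : Int) ^ st.1)) (0, 0)).2 = _
  rw [pv_key]
  simp
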